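-- pv_equiv track=rewrite | github.com/pinkpurplered/piano_accompaniment_generation | back-end/melody_analyze.py | _partition_bars
-- ===== SOURCE A (Python) =====
-- ALLOWED_PHRASE_BARS = (8, 4)
--
-- def _normalize_bar_count(total_bars: int) -> int:
--     n = max(4, int(total_bars))
--     r = n % 4
--     if r:
--         n += 4 - r
--     return n
--
-- def _partition_bars(total_bars: int) -> list[int]:
--     """Split bar count into allowed phrase lengths; prefer larger chunks (fewer phrases)."""
--     total_bars = _normalize_bar_count(total_bars)
--     allowed = tuple(sorted(ALLOWED_PHRASE_BARS, reverse=True))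
--     parts: list[int] = []
--     rem = total_bars
--     while rem > 0:
--         chosen = None
--         for a in allowed:
--             if a > rem:
--                 continue
--             tail = rem - a
--             if tail == 0 or tail >= 4:
--                 chosen = a
--                 break
--         if chosen is None:
--             chosen = 4
--         parts.append(chosen)
--         rem -= chosen
--     for p in parts:
--         if p not in ALLOWED_PHRASE_BARS:
--             raise RuntimeError(f"Invalid phrase partition {parts!r}")
--     return parts
-- ===== SOURCE B (Python) =====
-- ALLOWED_PHRASE_BARS = (8, 4)
--
-- def _normalize_bar_count(total_bars: int) -> int:
--     n = max(4, int(total_bars))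
--     r = n % 4
--     if r:
--         n += 4 - r
--     return n
--
-- def _partition_bars(total_bars: int) -> list[int]:
--     """Closed form: all 8-bar phrases, plus one trailing 4 when n % 8 == 4."""
--     n = _normalize_bar_count(total_bars)
--     parts = [8] * (n // 8)
--     if n % 8:
--         parts.append(4)
--     return parts
-- ===== Notes on version B (the rewrite author's own statement) =====
-- stated objective: simpler
-- what changed: Replaced the greedy while-loop (with inner candidate scan and dead validation loop) by a closed-form partition: n//8 eights plus one trailing 4 when n % 8 != 0.
import Mathlib
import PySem

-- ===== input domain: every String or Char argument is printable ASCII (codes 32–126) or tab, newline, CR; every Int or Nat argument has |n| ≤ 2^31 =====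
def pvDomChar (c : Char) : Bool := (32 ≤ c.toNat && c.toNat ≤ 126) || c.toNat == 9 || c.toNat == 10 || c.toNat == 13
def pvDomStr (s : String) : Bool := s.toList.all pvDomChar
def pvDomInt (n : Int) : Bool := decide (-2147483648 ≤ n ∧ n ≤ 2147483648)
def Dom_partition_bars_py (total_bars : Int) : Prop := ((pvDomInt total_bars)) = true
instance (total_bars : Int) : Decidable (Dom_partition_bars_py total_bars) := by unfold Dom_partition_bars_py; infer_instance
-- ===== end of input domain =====

-- B replaces A's greedy while-loop by the closed-form partition [8]*(n//8) (++ [4] if n%8 ≠ 0); objective: simpler.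

-- ===== PORT A =====
def normalize_bar_count_py (total_bars : Int) : Int :=
  let n := max 4 total_bars
  let r := PySem.Int.mod n 4
  if r ≠ 0 then n + (4 - r) else n

-- inner 'for a in allowed' scan: first a with a ≤ rem and (tail = 0 or tail ≥ 4)
def pvPickChosen (rem : Int) : List Int → Option Int
  | [] => none
  | a :: rest =>
    if a > rem then pvPickChosen rem rest
    else if rem - a = 0 ∨ rem - a ≥ 4 then some a
    else pvPickChosen rem rest

-- the 'while rem > 0' loop; fuel = rem.toNat suffices since each step subtracts ≥ 4
def pvLoopA (fuel : Nat) (rem : Int) (parts : List Int) : List Int :=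
  match fuel with
  | 0 => parts
  | fuel + 1 =>
    if rem > 0 then
      let chosen := (pvPickChosen rem [8, 4]).getD 4
      pvLoopA fuel (rem - chosen) (parts ++ [chosen])
    else parts

def partition_bars_py (total_bars : Int) : List Int :=
  let n := normalize_bar_count_py total_bars
  let parts := pvLoopA n.toNat n []
  -- final validation loop: Python raises RuntimeError if some p ∉ (8, 4); unreachable, ported as the else-branch []
  if parts.all (fun p => p = 8 || p = 4) then parts else []

-- ===== PORT B =====
def partition_bars_py_alt (total_bars : Int) : List Int :=
  let n := normalize_bar_count_py total_bars
  let parts := List.replicate (PySem.Int.floordiv n 8).toNat (8 : Int)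
  if PySem.Int.mod n 8 ≠ 0 then parts ++ [4] else parts

-- ===== PRECONDITION & SPEC =====
def Spec_partition_bars_py (total_bars : Int) (out : List Int) : Prop := out = partition_bars_py_alt total_bars
instance (total_bars : Int) (out : List Int) : Decidable (Spec_partition_bars_py total_bars out) := by unfold Spec_partition_bars_py; infer_instance

-- ===== CLAIM (what is proved, stated in full; the proofs are below) =====
def Claim_equal_partition_bars_py : Prop := ∀ (total_bars : Int), Dom_partition_bars_py total_bars → Spec_partition_bars_py total_bars (partition_bars_py total_bars)

-- ===== LEMMAS AND PROOFS =====

theorem normalize_props (t : Int) :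
    4 ≤ normalize_bar_count_py t ∧ normalize_bar_count_py t % 4 = 0 := by
  simp only [normalize_bar_count_py, PySem.Int.mod_eq_emod_of_pos (show (0:Int) < 4 by norm_num)]
  split_ifs with h <;> constructor <;> omega

theorem pvLoopA_spec (fuel : Nat) : ∀ (rem : Int) (parts : List Int),
    rem.toNat ≤ fuel → 0 ≤ rem → rem % 4 = 0 →
    pvLoopA fuel rem parts =
      parts ++ (List.replicate (rem / 8).toNat (8 : Int) ++ if rem % 8 ≠ 0 then [4] else []) := by
  induction fuel with
  | zero =>
    intro rem parts hf h0 h4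
    have : rem = 0 := by omega
    subst this
    simp [pvLoopA]
  | succ fuel ih =>
    intro rem parts hf h0 h4
    by_cases hpos : rem > 0
    · rcases (by omega : rem = 4 ∨ 8 ≤ rem) with h4' | h8
      · subst h4'
        have hpick : pvPickChosen 4 [8, 4] = some 4 := by decide
        simp only [pvLoopA, if_pos hpos, hpick, Option.getD_some]
        have hz : pvLoopA fuel ((4:Int) - 4) (parts ++ [4]) = parts ++ [4] := by
          cases fuel <;> simp [pvLoopA]
        rw [hz]
        norm_num
      · have hpick : pvPickChosen rem [8, 4] = some 8 := by
          unfold pvPickChosen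
          have : ¬ (8 > rem) := by omega
          rw [if_neg this, if_pos (by omega)]
        simp only [pvLoopA, if_pos hpos, hpick, Option.getD_some]
        rw [ih (rem - 8) (parts ++ [8]) (by omega) (by omega) (by omega)]
        have h1 : (rem / 8).toNat = ((rem - 8) / 8).toNat + 1 := by omega
        have h2 : rem % 8 = (rem - 8) % 8 := by omega
        rw [h1, h2, List.replicate_succ]
        simp
    · have : rem = 0 := by omega
      subst this
      simp [pvLoopA]

theorem partition_bars_py_eq (t : Int) : partition_bars_py t = partition_bars_py_alt t := by
  obtain ⟨h4, hmod⟩ := normalize_props t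
  unfold partition_bars_py partition_bars_py_alt
  simp only [PySem.Int.mod_eq_emod_of_pos (show (0:Int) < 8 by norm_num),
    PySem.Int.floordiv_eq_ediv_of_pos (show (0:Int) < 8 by norm_num)]
  rw [pvLoopA_spec _ _ _ (le_refl _) (by omega) hmod]
  have hall : ((List.replicate ((normalize_bar_count_py t) / 8).toNat (8 : Int) ++
      if (normalize_bar_count_py t) % 8 ≠ 0 then [4] else []).all (fun p => p = 8 || p = 4)) = true := by
    simp only [List.all_append, List.all_replicate, Bool.and_eq_true]
    constructor
    · cases ((normalize_bar_count_py t) / 8).toNat <;> simp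
    · split_ifs <;> simp
  simp only [List.nil_append, hall, if_pos]
  split_ifs <;> simp

-- ===== VERDICT (by name: the statement is the Claim_ definition above) =====
theorem partition_bars_py_spec : Claim_equal_partition_bars_py := by
  intro t _
  exact partition_bars_py_eq t
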